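-- pv_equiv track=rewrite | github.com/sburdges-eng/miDiKompanion | code/python/vendor_manager.py | _calculate_search_score
-- ===== SOURCE A (Python) =====
-- def _calculate_search_score(query: str, text: str) -> float:
--     """Calculate search relevance score"""
--     score = 0
--     query_words = query.split()
--
--     for word in query_words:
--         if len(word) < 3:
--             continue
--         if word in text:
--             score += 2  # Exact word match
--         elif any(word in text_word for text_word in text.split()):
--             score += 1  # Partial match
--
--     return score
-- ===== SOURCE B (Python) =====
-- def _calculate_search_score(query: str, text: str) -> float:
--     """Calculate search relevance score.
--
--     Single flat pass: a word contained in any whitespace token of `text`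
--     is also contained in `text` itself, so the partial-match branch of the
--     original can never fire and each qualifying word is worth exactly 2.
--     """
--     return sum(2 for word in query.split() if len(word) >= 3 and word in text)
-- ===== Notes on version B (the rewrite author's own statement) =====
-- stated objective: simpler
-- what changed: A's nested per-word scan over text.split() (the elif partial-match branch) is provably dead code, since a substring of a token is a substring of the text; B computes the score in one flat generator-sum with no inner loop and no branching accumulator.
import Mathlib
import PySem

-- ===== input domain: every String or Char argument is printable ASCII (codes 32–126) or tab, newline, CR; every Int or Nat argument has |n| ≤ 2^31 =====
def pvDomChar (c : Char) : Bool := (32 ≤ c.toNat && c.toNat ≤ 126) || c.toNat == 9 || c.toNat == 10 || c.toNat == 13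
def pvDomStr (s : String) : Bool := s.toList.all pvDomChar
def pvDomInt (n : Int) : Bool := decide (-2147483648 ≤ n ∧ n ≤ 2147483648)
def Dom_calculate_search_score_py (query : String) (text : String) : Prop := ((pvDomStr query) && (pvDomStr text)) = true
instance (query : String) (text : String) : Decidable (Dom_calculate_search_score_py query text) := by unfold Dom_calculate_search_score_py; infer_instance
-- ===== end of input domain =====

-- B drops A's nested scan over text.split() (a provably dead elif branch) and sums the score in one flat pass (objective: simpler).

-- ===== PORT A =====
def calculate_search_score_py (query : String) (text : String) : Int :=
  (PySem.Str.split₀ query).foldl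
    (fun score word =>
      if PySem.Str.len word < 3 then score        -- continue
      else if PySem.Str.isIn word text then score + 2
      else if (PySem.Str.split₀ text).any (fun text_word => PySem.Str.isIn word text_word) then score + 1
      else score)
    0

-- ===== PORT B =====
def calculate_search_score_py_alt (query : String) (text : String) : Int :=
  2 * ((PySem.Str.split₀ query).countP
        (fun word => decide (3 ≤ PySem.Str.len word) && PySem.Str.isIn word text) : Nat)

-- ===== PRECONDITION & SPEC =====
def Spec_calculate_search_score_py (query : String) (text : String) (out : Int) : Prop := out = calculate_search_score_py_alt query text
instance (query : String) (text : String) (out : Int) : Decidable (Spec_calculate_search_score_py query text out) := by unfold Spec_calculate_search_score_py; infer_instance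

-- ===== CLAIM (what is proved, stated in full; the proofs are below) =====
def Claim_equal_calculate_search_score_py : Prop := ∀ (query : String) (text : String), Dom_calculate_search_score_py query text → Spec_calculate_search_score_py query text (calculate_search_score_py query text)

-- ===== LEMMAS AND PROOFS =====

-- Every word produced by split₀.go is in acc, or is cur.reverse followed by a prefix of s, or an infix of s.
theorem pv_go_mem (s : List Char) (cur : List Char) (acc : List (List Char)) (w : List Char)
    (hw : w ∈ PySem.Chars.split₀.go s cur acc) :
    w ∈ acc ∨ (∃ p, p <+: s ∧ w = cur.reverse ++ p) ∨ (∃ p, p <:+: s ∧ w = p) := by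
  induction s generalizing cur acc with
  | nil =>
    simp only [PySem.Chars.split₀.go] at hw
    split at hw
    · exact Or.inl (by simpa using hw)
    · rcases (by simpa using hw : w ∈ acc ∨ w = cur.reverse) with h | h
      · exact Or.inl h
      · exact Or.inr (Or.inl ⟨[], List.nil_prefix, by simp [h]⟩)
  | cons c rest ih =>
    simp only [PySem.Chars.split₀.go] at hw
    split at hw
    · split at hw
      · rcases ih _ _ hw with h | ⟨p, hp, hwp⟩ | ⟨p, hp, hwp⟩
        · exact Or.inl h
        · exact Or.inr (Or.inr ⟨p, hp.isInfix.trans (List.infix_cons (List.infix_refl rest)), by simpa using hwp⟩)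
        · exact Or.inr (Or.inr ⟨p, hp.trans (List.infix_cons (List.infix_refl rest)), hwp⟩)
      · rcases ih _ _ hw with h | ⟨p, hp, hwp⟩ | ⟨p, hp, hwp⟩
        · rcases List.mem_cons.mp h with h | h
          · exact Or.inr (Or.inl ⟨[], List.nil_prefix, by simp [h]⟩)
          · exact Or.inl h
        · exact Or.inr (Or.inr ⟨p, hp.isInfix.trans (List.infix_cons (List.infix_refl rest)), by simpa using hwp⟩)
        · exact Or.inr (Or.inr ⟨p, hp.trans (List.infix_cons (List.infix_refl rest)), hwp⟩)
    · rcases ih _ _ hw with h | ⟨p, hp, hwp⟩ | ⟨p, hp, hwp⟩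
      · exact Or.inl h
      · exact Or.inr (Or.inl ⟨c :: p, List.cons_prefix_cons.mpr ⟨rfl, hp⟩, by simp [hwp]⟩)
      · exact Or.inr (Or.inr ⟨p, hp.trans (List.infix_cons (List.infix_refl rest)), hwp⟩)

-- Every whitespace token of s is an infix of s.
theorem pv_token_infix (s w : List Char) (hw : w ∈ PySem.Chars.split₀ s) : w <:+: s := by
  rcases pv_go_mem s [] [] w hw with h | ⟨p, hp, hwp⟩ | ⟨p, hp, hwp⟩
  · simp at h
  · simpa [hwp] using hp.isInfix
  · simpa [hwp] using hp

-- The partial-match branch of A is dead: if word is not in text it is in no token of text.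
theorem pv_dead_branch (word text : String) (h : PySem.Str.isIn word text = false) :
    (PySem.Str.split₀ text).any (fun tw => PySem.Str.isIn word tw) = false := by
  rw [List.any_eq_false]
  intro tw htw
  rw [Bool.not_eq_true, PySem.Str.isIn_eq, PySem.Chars.isIn_eq_false_iff]
  intro hinf
  have htok : tw.toList ∈ PySem.Chars.split₀ text.toList := by
    rw [← PySem.Str.split₀_map_toList]
    exact List.mem_map_of_mem htw
  have : PySem.Chars.isIn word.toList text.toList = true :=
    (PySem.Chars.isIn_iff_infix _ _).mpr (hinf.trans (pv_token_infix _ _ htok))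
  rw [PySem.Str.isIn_eq, this] at h
  exact Bool.true_eq_false.mp h

-- A's loop body, pointwise, equals B's contribution.
theorem pv_step (text : String) (score : Int) (word : String) :
    (if PySem.Str.len word < 3 then score
     else if PySem.Str.isIn word text then score + 2
     else if (PySem.Str.split₀ text).any (fun tw => PySem.Str.isIn word tw) then score + 1
     else score)
    = score + (if (decide (3 ≤ PySem.Str.len word) && PySem.Str.isIn word text) then 2 else 0) := by
  by_cases hlen : PySem.Str.len word < 3
  · rw [if_pos hlen,
      if_neg (by simp only [Bool.and_eq_true, decide_eq_true_eq]; rintro ⟨h3, -⟩; omega)]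
    omega
  · cases hin : PySem.Str.isIn word text with
    | true =>
      rw [if_neg hlen, if_pos rfl, Bool.and_true,
        if_pos (decide_eq_true (show (3:Int) ≤ PySem.Str.len word by omega))]
    | false =>
      have hany := pv_dead_branch word text hin
      rw [if_neg hlen, if_neg (fun hc => Bool.false_ne_true hc),
        if_neg (fun hc => Bool.false_ne_true (hany ▸ hc)), Bool.and_false,
        if_neg (fun hc => Bool.false_ne_true hc)]
      omega

-- Folding A's body over any word list yields the initial score plus 2 per qualifying word.
theorem pv_foldl (text : String) (ws : List String) (score : Int) :
    ws.foldl
      (fun score word =>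
        if PySem.Str.len word < 3 then score
        else if PySem.Str.isIn word text then score + 2
        else if (PySem.Str.split₀ text).any (fun tw => PySem.Str.isIn word tw) then score + 1
        else score) score
    = score + 2 * (ws.countP (fun word => decide (3 ≤ PySem.Str.len word) && PySem.Str.isIn word text) : Nat) := by
  induction ws generalizing score with
  | nil => simp
  | cons w ws ih =>
    simp only [List.foldl_cons]
    rw [ih, pv_step, List.countP_cons]
    split_ifs with h
    · push_cast
      ring
    · push_cast
      ring

-- ===== VERDICT (by name: the statement is the Claim_ definition above) =====
theorem calculate_search_score_py_spec : Claim_equal_calculate_search_score_py := by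
  intro query text _
  unfold Spec_calculate_search_score_py calculate_search_score_py calculate_search_score_py_alt
  rw [pv_foldl]
  ring
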